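-- pv_equiv track=rewrite | github.com/sssseungu/coding-test | programmers/250911_42895_N으로표현.py | solution
-- ===== SOURCE A (Python) =====
-- def solution(N, number):
--
--     # N을 count 개 사용한 모든 연산 결과를 담은 집합 반환
--     def get_all_results(count):
--
--         if count == 1:
--             return {N}
--
--         results = set()
--         results.add(int(str(N) * count))  # N을 count번 붙인 수 저장
--
--         # (1, count-1)이 아니라
--         # 중간 분할도 고려해야함.. [(2, count-2), (3, count-3), ..., (count//2, count//2)]
--         for i in range(1, count // 2 + 1):
--
--             # 중간 분할 (i, count-i) 각각에 대한 모든 계산 결과 조합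
--             prev_results_1 = get_all_results(i)
--             prev_results_2 = get_all_results(count - i)
--
--             for num1 in prev_results_1:
--                 for num2 in prev_results_2:
--                     results.add(num1 + num2)
--                     results.add(num1 * num2)
--
--                     results.add(num1 - num2)
--                     results.add(num2 - num1)
--
--                     if num2 != 0:
--                         results.add(num1 // num2)
--                     if num1 != 0:
--                         results.add(num2 // num1)
--
--         return results
--
--     for i in range(1, 9):
--         if number in get_all_results(i):
--             return i
--
--     return -1
-- ===== SOURCE B (Python) =====
-- def solution(N, number):
--     # Bottom-up DP: each "all results with c copies of N" set is computed exactly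
--     # once from memoized smaller sets, instead of A's naive recursive recomputation.
--     memo = {}
--     for c in range(1, 9):
--         if c == 1:
--             results = {N}
--         else:
--             results = {int(str(N) * c)}
--             for i in range(1, c // 2 + 1):
--                 for a in memo[i]:
--                     for b in memo[c - i]:
--                         results.add(a + b)
--                         results.add(a * b)
--                         results.add(a - b)
--                         results.add(b - a)
--                         if b != 0:
--                             results.add(a // b)
--                         if a != 0:
--                             results.add(b // a)
--         if number in results:
--             return c
--         memo[c] = results
--     return -1
-- ===== Notes on version B (the rewrite author's own statement) =====
-- stated objective: alternative
-- what changed: Replaces A's naive recursion (which recomputes get_all_results(i) for the same i exponentially many times) by a bottom-up DP loop that builds each per-count result set exactly once into a memo dict, checking the target after each level.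
import Mathlib
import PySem

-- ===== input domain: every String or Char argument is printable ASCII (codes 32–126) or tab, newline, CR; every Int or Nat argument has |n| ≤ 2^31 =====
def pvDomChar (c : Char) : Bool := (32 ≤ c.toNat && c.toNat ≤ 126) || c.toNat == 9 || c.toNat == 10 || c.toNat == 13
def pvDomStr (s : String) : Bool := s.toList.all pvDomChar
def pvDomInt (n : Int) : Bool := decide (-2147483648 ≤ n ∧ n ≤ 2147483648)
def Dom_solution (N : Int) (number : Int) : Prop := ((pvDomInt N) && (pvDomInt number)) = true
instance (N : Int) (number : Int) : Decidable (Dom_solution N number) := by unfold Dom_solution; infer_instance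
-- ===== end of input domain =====

-- B replaces A's naive recursive enumeration by a bottom-up memo table (each
-- per-count result set computed once); equivalence is about the return value.

-- int(str(N) * c); shared primitive helper. `.getD 0` is unreachable inside
-- Pre_solution: for N < 0 Python raises ValueError here (excluded by Pre_).
def concatN (N : Int) (c : Nat) : Int :=
  (PySem.Int.ofChars? (List.flatten (List.replicate c (PySem.Int.toChars N)))).getD 0

-- ===== PORT A =====
-- get_all_results(count): naive recursion, recomputing sub-results each time
def getAll (N : Int) (count : Nat) : PySem.Set Int :=
  if count = 1 then PySem.Set.ofList [N]
  else
    (List.range' 1 (count / 2)).attach.foldl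
      (fun results i =>
        let prev1 := getAll N i.1
        let prev2 := getAll N (count - i.1)
        prev1.foldl (fun results num1 =>
          prev2.foldl (fun results num2 =>
            let results := (((results.add (num1 + num2)).add (num1 * num2)).add
                (num1 - num2)).add (num2 - num1)
            let results := if num2 ≠ 0 then results.add (PySem.Int.floordiv num1 num2) else results
            if num1 ≠ 0 then results.add (PySem.Int.floordiv num2 num1) else results)
          results) results)
      (PySem.Set.add PySem.Set.empty (concatN N count))
termination_by count
decreasing_by
  all_goals
    rcases List.mem_range'_1.mp i.2 with ⟨h1, h2⟩
    omega

def solution (N : Int) (number : Int) : Int :=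
  -- for i in range(1, 9): if number in get_all_results(i): return i; return -1
  match (List.range' 1 8).find? (fun i => PySem.Set.contains (getAll N i) number) with
  | some i => (i : Int)
  | none => -1

-- ===== PORT B =====
-- one level of the DP table: results for c copies, from the memo dict
def buildLevel (N : Int) (memo : PySem.Dict Int (PySem.Set Int)) (c : Nat) : PySem.Set Int :=
  (List.range' 1 (c / 2)).foldl
    (fun results (i : Nat) =>
      (memo.getD (i : Int) PySem.Set.empty).foldl (fun results a =>
        (memo.getD (↑(c - i) : Int) PySem.Set.empty).foldl (fun results b =>
          let results := (((results.add (a + b)).add (a * b)).add (a - b)).add (b - a)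
          let results := if b ≠ 0 then results.add (PySem.Int.floordiv a b) else results
          if a ≠ 0 then results.add (PySem.Int.floordiv b a) else results)
        results) results)
    (PySem.Set.ofList [concatN N c])

-- the main loop: for c in range(1, 9): build level c, test, memoize
def altLoop (N : Int) (number : Int) (memo : PySem.Dict Int (PySem.Set Int)) (c : Nat) : Int :=
  if c ≤ 8 then
    let results := if c = 1 then PySem.Set.ofList [N] else buildLevel N memo c
    if PySem.Set.contains results number then (c : Int)
    else altLoop N number (memo.insert (c : Int) results) (c + 1)
  else -1
termination_by 9 - c

def solution_alt (N : Int) (number : Int) : Int :=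
  altLoop N number PySem.Dict.empty 1

-- ===== PRECONDITION & SPEC =====
-- Pre_ excludes exactly the inputs where the Python raises ValueError at
-- int(str(N)*count): N < 0 with number ≠ N (both A and B raise there).
def Pre_solution (N : Int) (number : Int) : Prop := 0 ≤ N ∨ number = N
instance (N : Int) (number : Int) : Decidable (Pre_solution N number) := by
  unfold Pre_solution; infer_instance
def pvWitness_solution : Int × Int := (5, 12)

def Spec_solution (N : Int) (number : Int) (out : Int) : Prop := out = solution_alt N number
instance (N : Int) (number : Int) (out : Int) : Decidable (Spec_solution N number out) := by
  unfold Spec_solution; infer_instance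

-- ===== CLAIM (what is proved, stated in full; the proofs are below) =====
def Claim_equal_solution : Prop := ∀ (N : Int) (number : Int), Dom_solution N number → Pre_solution N number → Spec_solution N number (solution N number)

-- ===== LEMMAS AND PROOFS =====

-- a level built from a correct memo is exactly A's recursive set
lemma buildLevel_eq_getAll (N : Int) (c : Nat) (memo : PySem.Dict Int (PySem.Set Int))
    (hc : c ≠ 1)
    (h : ∀ j : Nat, 1 ≤ j → j < c → memo.getD (j : Int) PySem.Set.empty = getAll N j) :
    buildLevel N memo c = getAll N c := by
  rw [getAll]
  simp only [if_neg hc, buildLevel]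
  rw [← List.foldl_attach]
  have hof : PySem.Set.ofList [concatN N c] = PySem.Set.add PySem.Set.empty (concatN N c) := rfl
  rw [hof]
  apply PySem.List.foldl_congr_mem
  intro acc i hi
  rcases List.mem_range'_1.mp i.2 with ⟨h1, h2⟩
  rw [h i.1 h1 (by omega), h (c - i.1) (by omega) (by omega)]

-- the loop invariant: with a correct memo for 1..c-1, B's loop computes A's search
lemma altLoop_eq (N : Int) (number : Int) :
    ∀ (k c : Nat) (memo : PySem.Dict Int (PySem.Set Int)), 9 - c = k → 1 ≤ c →
    (∀ j : Nat, 1 ≤ j → j < c → memo.getD (j : Int) PySem.Set.empty = getAll N j) →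
    altLoop N number memo c =
      (match (List.range' c (9 - c)).find? (fun i => PySem.Set.contains (getAll N i) number) with
       | some i => (i : Int)
       | none => -1) := by
  intro k
  induction k with
  | zero =>
    intro c memo hk hc hmemo
    rw [altLoop, if_neg (by omega), hk]
    simp
  | succ k ih =>
    intro c memo hk hc hmemo
    have h8 : c ≤ 8 := by omega
    rw [altLoop, if_pos h8]
    have hres : (if c = 1 then PySem.Set.ofList [N] else buildLevel N memo c) = getAll N c := by
      by_cases h1 : c = 1
      · subst h1; rw [getAll]; simp
      · rw [if_neg h1]; exact buildLevel_eq_getAll N c memo h1 hmemo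
    have hrange : List.range' c (9 - c) = c :: List.range' (c + 1) (8 - c) := by
      have h9 : 9 - c = (8 - c) + 1 := by omega
      rw [h9, List.range'_succ]
    rw [hres, hrange, List.find?_cons]
    by_cases hm : number ∈ getAll N c
    · simp [hm]
    · have hfalse : PySem.Set.contains (getAll N c) number = false := by
        rw [← Bool.not_eq_true, PySem.Set.contains_iff]; exact hm
      have hmemo' : ∀ j : Nat, 1 ≤ j → j < c + 1 →
          (memo.insert (c : Int) (getAll N c)).getD (j : Int) PySem.Set.empty = getAll N j := by
        intro j hj1 hj2
        by_cases hjc : j = c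
        · subst hjc
          rw [PySem.Dict.getD_insert_self]
        · have hne : (j : Int) ≠ (c : Int) := by exact_mod_cast hjc
          rw [PySem.Dict.getD_insert_of_ne _ _ _ hne]
          exact hmemo j hj1 (by omega)
      have h9 : 9 - (c + 1) = 8 - c := by omega
      rw [hfalse]
      simp only []
      rw [ih (c + 1) _ (by omega) (by omega) hmemo', h9]
      simp [hm]

-- ===== VERDICT (by name: the statement is the Claim_ definition above) =====
theorem solution_spec : Claim_equal_solution := by
  intro N number _ _
  unfold Spec_solution solution solution_alt
  rw [altLoop_eq N number 8 1 PySem.Dict.empty (by omega) (by omega) (by intro j h1 h2; omega)]
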